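-- pv_equiv track=rewrite | github.com/paqui4ever/Algoritmos-y-Estructuras-de-Datos-I | Parciales Python/Parcial3.py | cuenta_posiciones_por_nacion
-- ===== SOURCE A (Python) =====
-- def cuenta_posiciones_por_nacion(naciones: list[str], torneos: dict[int, list[str]]) -> dict[str, list[int]]:
--     res: dict[str, list[int]] = {}
--     largo_naciones = len(naciones)
--     for i in range (largo_naciones): # Armo la lista un pais a la vez
--         posiciones_cero = [0]*largo_naciones # Por país creo la lista de posiciones
--         for año, posiciones in torneos.items(): # Itero sobre tupla[0] (año) y tupla[1] (posiciones)
--             for j in range(len(posiciones)): # Itero sobre la lista de posiciones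
--                 if naciones[i] == posiciones[j]: # Si encuentro al país de indice i en la lista de naciones en la posicion j de la tupla[1]
--                                                  #agrego un 1 en esa posicion para posiciones_cero y agrego esa entrada al dict
--                     posiciones_cero[j] += 1
--                     res[naciones[i]] = posiciones_cero
--     return res
-- ===== SOURCE B (Python) =====
-- def cuenta_posiciones_por_nacion(naciones: list[str], torneos: dict[int, list[str]]) -> dict[str, list[int]]:
--     # One pass over the tournaments building nation -> per-position count vector,
--     # then emit in the order of `naciones`.
--     counts: dict[str, list[int]] = {}
--     largo = len(naciones)
--     quienes = set(naciones)
--     for posiciones in torneos.values():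
--         for j, p in enumerate(posiciones):
--             if p in counts:
--                 counts[p][j] += 1
--             elif p in quienes:
--                 fila = [0] * largo
--                 fila[j] = 1
--                 counts[p] = fila
--     res: dict[str, list[int]] = {}
--     for n in naciones:
--         if n in counts:
--             res[n] = counts[n]
--     return res
-- ===== Notes on version B (the rewrite author's own statement) =====
-- stated objective: faster
-- what changed: Instead of scanning every tournament position list once per nation (N full passes), B makes a single pass over the tournaments maintaining a dict nation->count vector and then emits the entries in naciones order.
import Mathlib
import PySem

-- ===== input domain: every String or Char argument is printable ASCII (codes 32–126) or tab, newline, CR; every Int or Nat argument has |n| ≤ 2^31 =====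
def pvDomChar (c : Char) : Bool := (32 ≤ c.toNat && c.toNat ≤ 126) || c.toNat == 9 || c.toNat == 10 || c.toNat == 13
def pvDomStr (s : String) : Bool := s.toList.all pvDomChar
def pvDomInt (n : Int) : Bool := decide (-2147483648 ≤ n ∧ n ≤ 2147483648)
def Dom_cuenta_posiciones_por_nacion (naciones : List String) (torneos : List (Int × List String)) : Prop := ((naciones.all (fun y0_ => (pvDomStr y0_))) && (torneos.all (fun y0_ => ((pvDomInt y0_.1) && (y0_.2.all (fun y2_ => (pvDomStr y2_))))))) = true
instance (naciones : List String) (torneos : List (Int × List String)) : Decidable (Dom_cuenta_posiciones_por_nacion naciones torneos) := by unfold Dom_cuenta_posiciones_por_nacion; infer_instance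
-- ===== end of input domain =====

-- B replaces A's per-nation rescans of all tournaments by a single pass over the
-- tournaments that builds a dict nation -> count vector, then emits in naciones order (objective: faster).

-- ===== PORT A =====
-- inner body of A: 'if naciones[i] == posiciones[j]: posiciones_cero[j] += 1; res[naciones[i]] = posiciones_cero'
-- (the Python aliases posiciones_cero into res, so each increment re-stores the updated list; out-of-range j
-- raises IndexError in Python — excluded by Pre_ below)
def pvStepA (n : String) (st : List Int × PySem.Dict String (List Int)) (pj : String × Nat) :
    List Int × PySem.Dict String (List Int) :=
  if pj.1 == n then
    let pc := st.1.set pj.2 (st.1.getD pj.2 0 + 1)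
    (pc, st.2.insert n pc)
  else st

def cuenta_posiciones_por_nacion (naciones : List String) (torneos : List (Int × List String)) :
    List (String × List Int) :=
  -- 'torneos' is a Python dict: duplicate keys collapse (last value wins) before A iterates .items()
  let ts := (PySem.Dict.ofList torneos).items
  (naciones.foldl (fun res n =>
      (ts.foldl (fun st t => t.2.zipIdx.foldl (pvStepA n) st)
        (List.replicate naciones.length (0 : Int), res)).2)
    PySem.Dict.empty).items

-- ===== PORT B =====
-- inner body of B: 'if p in counts: counts[p][j] += 1 elif p in quienes: fila = [0]*largo; fila[j] = 1; counts[p] = fila'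
def pvStepB (quienes : List String) (largo : Nat) (counts : PySem.Dict String (List Int))
    (pj : String × Nat) : PySem.Dict String (List Int) :=
  if counts.contains pj.1 then
    let v := counts.getD pj.1 []
    counts.insert pj.1 (v.set pj.2 (v.getD pj.2 0 + 1))
  else if quienes.contains pj.1 then
    counts.insert pj.1 ((List.replicate largo (0 : Int)).set pj.2 1)
  else counts

def cuenta_posiciones_por_nacion_alt (naciones : List String) (torneos : List (Int × List String)) :
    List (String × List Int) :=
  let largo := naciones.length
  let quienes := PySem.Set.ofList naciones
  let counts := (PySem.Dict.ofList torneos).values.foldl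
    (fun c pos => pos.zipIdx.foldl (pvStepB quienes largo) c) PySem.Dict.empty
  (naciones.foldl (fun res n =>
      if counts.contains n then res.insert n (counts.getD n []) else res)
    PySem.Dict.empty).items

-- ===== PRECONDITION & SPEC =====
-- Pre_ excludes exactly the inputs where the Python A raises IndexError: some nation of `naciones`
-- occurring in a tournament's position list at an index ≥ len(naciones) (then 'posiciones_cero[j] += 1'
-- is out of range).  B raises there too.
def Pre_cuenta_posiciones_por_nacion (naciones : List String) (torneos : List (Int × List String)) : Prop :=
  ((PySem.Dict.ofList torneos).items.all (fun t =>
    t.2.zipIdx.all (fun pj => !(naciones.contains pj.1) || decide (pj.2 < naciones.length)))) = true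
instance (naciones : List String) (torneos : List (Int × List String)) : Decidable (Pre_cuenta_posiciones_por_nacion naciones torneos) := by unfold Pre_cuenta_posiciones_por_nacion; infer_instance

def pvWitness_cuenta_posiciones_por_nacion : List String × (List (Int × List String)) :=
  (["AR", "BR", "UY"], [(1930, ["UY", "AR"]), (1950, ["UY", "BR", "AR"])])

def Spec_cuenta_posiciones_por_nacion (naciones : List String) (torneos : List (Int × List String)) (out : List (String × List Int)) : Prop := out = cuenta_posiciones_por_nacion_alt naciones torneos
instance (naciones : List String) (torneos : List (Int × List String)) (out : List (String × List Int)) : Decidable (Spec_cuenta_posiciones_por_nacion naciones torneos out) := by unfold Spec_cuenta_posiciones_por_nacion; infer_instance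

-- ===== CLAIM (what is proved, stated in full; the proofs are below) =====
def Claim_equal_cuenta_posiciones_por_nacion : Prop := ∀ (naciones : List String) (torneos : List (Int × List String)), Dom_cuenta_posiciones_por_nacion naciones torneos → Pre_cuenta_posiciones_por_nacion naciones torneos → Spec_cuenta_posiciones_por_nacion naciones torneos (cuenta_posiciones_por_nacion naciones torneos)

-- ===== LEMMAS AND PROOFS =====

-- the count vector accumulated over one position list (first component of A's inner loop)
def pvBump (n : String) (v : List Int) (pos : List String) (k : Nat) : List Int :=
  (pos.zipIdx k).foldl (fun v pj => if pj.1 == n then v.set pj.2 (v.getD pj.2 0 + 1) else v) v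

-- the count vector accumulated over all tournaments
def pvCnt (n : String) (ts : List (Int × List String)) (v : List Int) : List Int :=
  ts.foldl (fun v t => pvBump n v t.2 0) v

theorem pvBump_of_not_mem (n : String) (v : List Int) (pos : List String) (k : Nat)
    (h : ¬ n ∈ pos) : pvBump n v pos k = v := by
  induction pos generalizing v k with
  | nil => rfl
  | cons p ps ih =>
      simp only [List.mem_cons, not_or] at h
      simp [pvBump, List.zipIdx_cons, List.foldl_cons, beq_iff_eq, Ne.symm h.1] at *
      exact ih v (k+1) h.2

theorem pvCnt_of_no_match (n : String) (ts : List (Int × List String)) (v : List Int)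
    (h : ∀ u ∈ ts, ¬ n ∈ u.2) : pvCnt n ts v = v := by
  induction ts generalizing v with
  | nil => rfl
  | cons u us ih =>
      simp only [pvCnt, List.foldl_cons]
      rw [pvBump_of_not_mem n v u.2 0 (h u (by simp))]
      exact ih v (fun w hw => h w (by simp [hw]))

theorem pvInnerA (n : String) (pos : List String) (k : Nat) (pc : List Int)
    (res : PySem.Dict String (List Int)) :
    (pos.zipIdx k).foldl (pvStepA n) (pc, res) =
      (pvBump n pc pos k, if n ∈ pos then res.insert n (pvBump n pc pos k) else res) := by
  induction pos generalizing k pc res with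
  | nil => simp [pvBump]
  | cons p ps ih =>
      by_cases hp : p = n
      · subst hp
        simp only [List.zipIdx_cons, List.foldl_cons, pvStepA, beq_self_eq_true, if_pos,
          List.mem_cons, true_or]
        rw [ih]
        have hb : pvBump p pc (p :: ps) k
            = pvBump p (pc.set k (pc.getD k 0 + 1)) ps (k+1) := by
          simp [pvBump, List.zipIdx_cons]
        by_cases hm : p ∈ ps
        · simp [hm, hb, PySem.Dict.insert_insert_self]
        · simp [hm, hb, pvBump_of_not_mem p _ ps (k+1) hm]
      · have hpn : (p == n) = false := by simp [hp]
        have hb : pvBump n pc (p :: ps) k = pvBump n pc ps (k+1) := by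
          simp [pvBump, List.zipIdx_cons, hp]
        simp only [List.zipIdx_cons, List.foldl_cons, pvStepA, hpn, Bool.false_eq_true,
          if_false, List.mem_cons]
        rw [ih, hb]
        have : ¬ n = p := fun h => hp h.symm
        simp [this]

theorem pvLoopA (n : String) (ts : List (Int × List String)) (pc : List Int)
    (res : PySem.Dict String (List Int)) :
    ts.foldl (fun st t => t.2.zipIdx.foldl (pvStepA n) st) (pc, res) =
      (pvCnt n ts pc,
       if ts.any (fun t => t.2.contains n) then res.insert n (pvCnt n ts pc) else res) := by
  induction ts generalizing pc res with
  | nil => simp [pvCnt]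
  | cons t ts ih =>
      simp only [List.foldl_cons]
      rw [pvInnerA n t.2 0 pc res, ih]
      have hc : pvCnt n (t :: ts) pc = pvCnt n ts (pvBump n pc t.2 0) := by
        simp [pvCnt]
      by_cases hm : n ∈ t.2
      · have hm' : (t.2.contains n) = true := by simpa using hm
        by_cases ha : (ts.any (fun t => t.2.contains n)) = true
        · rw [if_pos hm, if_pos ha, hc]
          rw [if_pos (by rw [List.any_cons, ha, Bool.or_true])]
          rw [PySem.Dict.insert_insert_self]
        · have hnone : ∀ u ∈ ts, ¬ n ∈ u.2 := by
            intro u hu hmem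
            exact ha (List.any_eq_true.2 ⟨u, hu, by simpa using hmem⟩)
          rw [if_pos hm, if_neg ha, hc, pvCnt_of_no_match n ts _ hnone]
          rw [if_pos (by rw [List.any_cons, hm', Bool.true_or])]
      · have hm' : (t.2.contains n) = false := by simpa using hm
        rw [if_neg hm, hc, pvBump_of_not_mem n pc t.2 0 hm]
        by_cases ha : (ts.any (fun t => t.2.contains n)) = true
        · rw [if_pos ha, if_pos (by rw [List.any_cons, ha, Bool.or_true])]
        · have haf : (ts.any fun t => t.2.contains n) = false := Bool.eq_false_iff.mpr ha
          rw [if_neg ha, if_neg (by rw [List.any_cons, hm', haf]; simp)]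

-- B's counts dict: lookup of n after processing the position lists
theorem pvCnts_of_no_match (n : String) (pss : List (List String)) (v : List Int)
    (h : ∀ u ∈ pss, ¬ n ∈ u) : pss.foldl (fun v pos => pvBump n v pos 0) v = v := by
  induction pss generalizing v with
  | nil => rfl
  | cons u us ih =>
      simp only [List.foldl_cons]
      rw [pvBump_of_not_mem n v u 0 (h u (by simp))]
      exact ih v (fun w hw => h w (by simp [hw]))

theorem pvInnerB_get (quienes : List String) (largo : Nat) (n : String) (pos : List String)
    (k : Nat) (c : PySem.Dict String (List Int)) (hn : n ∈ quienes) :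
    ((pos.zipIdx k).foldl (pvStepB quienes largo) c).get? n =
      if n ∈ pos then
        some (pvBump n ((c.get? n).getD (List.replicate largo 0)) pos k)
      else c.get? n := by
  induction pos generalizing k c with
  | nil => simp
  | cons p ps ih =>
      have hstep : (p :: ps).zipIdx k = (p, k) :: ps.zipIdx (k+1) := by
        simp [List.zipIdx_cons]
      rw [hstep]
      simp only [List.foldl_cons]
      by_cases hp : p = n
      · subst hp
        by_cases hco : c.contains p = true
        · obtain ⟨v, hv⟩ : ∃ v, c.get? p = some v := by
            rw [PySem.Dict.contains_eq_isSome_get?] at hco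
            exact Option.isSome_iff_exists.1 hco
          have hgd : c.getD p [] = v := by
            rw [PySem.Dict.getD_eq_get?_getD, hv]; rfl
          have hstepB : pvStepB quienes largo c (p, k)
              = c.insert p (v.set k (v.getD k 0 + 1)) := by
            simp only [pvStepB, hco, if_pos, hgd]
          rw [hstepB, ih]
          have hget : (c.insert p (v.set k (v.getD k 0 + 1))).get? p
              = some (v.set k (v.getD k 0 + 1)) := PySem.Dict.get?_insert_self _ _ _
          have hbump : pvBump p ((c.get? p).getD (List.replicate largo 0)) (p :: ps) k
              = pvBump p (v.set k (v.getD k 0 + 1)) ps (k+1) := by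
            simp [pvBump, List.zipIdx_cons, hv]
          rw [hget, hbump]
          simp only [Option.getD_some, List.mem_cons, true_or, if_pos]
          by_cases hps : p ∈ ps
          · rw [if_pos hps]
          · rw [if_neg hps, pvBump_of_not_mem p _ ps (k+1) hps]
        · have hco' : c.contains p = false := Bool.eq_false_iff.mpr hco
          have hv : c.get? p = none := by
            rw [PySem.Dict.contains_eq_isSome_get?] at hco'
            exact Option.not_isSome_iff_eq_none.1 (by simp [hco'])
          have hq : quienes.contains p = true := by simpa using hn
          have hstepB : pvStepB quienes largo c (p, k)
              = c.insert p ((List.replicate largo (0:Int)).set k 1) := by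
            simp only [pvStepB, hco', Bool.false_eq_true, if_false, hq, if_pos]
          rw [hstepB, ih]
          have hget : (c.insert p ((List.replicate largo (0:Int)).set k 1)).get? p
              = some ((List.replicate largo (0:Int)).set k 1) := PySem.Dict.get?_insert_self _ _ _
          have hbump : pvBump p ((c.get? p).getD (List.replicate largo 0)) (p :: ps) k
              = pvBump p ((List.replicate largo (0:Int)).set k 1) ps (k+1) := by
            simp [pvBump, List.zipIdx_cons, hv]
          rw [hget, hbump]
          simp only [Option.getD_some, List.mem_cons, true_or, if_pos]
          by_cases hps : p ∈ ps
          · rw [if_pos hps]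
          · rw [if_neg hps, pvBump_of_not_mem p _ ps (k+1) hps]
      · have hpn : (p == n) = false := by simp [hp]
        have hnp : ¬ n = p := fun h => hp h.symm
        have hfix : (pvStepB quienes largo c (p, k)).get? n = c.get? n := by
          simp only [pvStepB]
          split
          · exact PySem.Dict.get?_insert_of_ne _ _ hnp
          · split
            · exact PySem.Dict.get?_insert_of_ne _ _ hnp
            · rfl
        have hbump : ∀ v, pvBump n v (p :: ps) k = pvBump n v ps (k+1) := by
          intro v; simp [pvBump, List.zipIdx_cons, hp]
        rw [ih, hfix]
        simp only [hbump, List.mem_cons, hnp, false_or]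

theorem pvLoopB_get (quienes : List String) (largo : Nat) (n : String)
    (pss : List (List String)) (c : PySem.Dict String (List Int)) (hn : n ∈ quienes) :
    (pss.foldl (fun c pos => pos.zipIdx.foldl (pvStepB quienes largo) c) c).get? n =
      if pss.any (fun pos => pos.contains n) then
        some (pss.foldl (fun v pos => pvBump n v pos 0)
          ((c.get? n).getD (List.replicate largo 0)))
      else c.get? n := by
  induction pss generalizing c with
  | nil => simp
  | cons pos pss ih =>
      simp only [List.foldl_cons]
      rw [ih, pvInnerB_get quienes largo n pos 0 c hn]
      by_cases hm : n ∈ pos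
      · have hm' : pos.contains n = true := by simpa using hm
        rw [if_pos hm]
        simp only [Option.getD_some, List.any_cons, hm', Bool.true_or, if_true]
        by_cases ha : (pss.any fun pos => pos.contains n) = true
        · rw [if_pos ha]
        · rw [if_neg ha]
          have hnone : ∀ u ∈ pss, ¬ n ∈ u := by
            intro u hu hmem
            exact ha (List.any_eq_true.2 ⟨u, hu, by simpa using hmem⟩)
          rw [pvCnts_of_no_match n pss _ hnone]
      · have hm' : pos.contains n = false := by simpa using hm
        rw [if_neg hm]
        simp only [List.any_cons, hm', Bool.false_or,
          pvBump_of_not_mem n _ pos 0 hm]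

-- ===== VERDICT (by name: the statement is the Claim_ definition above) =====
theorem cuenta_posiciones_por_nacion_spec : Claim_equal_cuenta_posiciones_por_nacion := by
  intro naciones torneos _ _
  unfold Spec_cuenta_posiciones_por_nacion
  simp only [cuenta_posiciones_por_nacion, cuenta_posiciones_por_nacion_alt, PySem.Dict.values]
  refine congrArg PySem.Dict.items ?_
  refine PySem.List.foldl_congr_mem naciones _ _ _ ?_
  intro acc n hn
  rw [pvLoopA]
  simp only [List.foldl_map]
  have hq : n ∈ PySem.Set.ofList naciones := (PySem.Set.mem_ofList _ _).2 hn
  have hcounts := pvLoopB_get (PySem.Set.ofList naciones) naciones.length n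
    ((PySem.Dict.ofList torneos).items.map (fun t => t.2)) PySem.Dict.empty hq
  simp only [List.any_map, List.foldl_map, Function.comp_def, PySem.Dict.get?_empty,
    Option.getD_none] at hcounts
  simp only [pvCnt]
  by_cases hmat : ((PySem.Dict.ofList torneos).items.any (fun t => t.2.contains n)) = true
  · rw [if_pos hmat]
    rw [if_pos hmat] at hcounts
    have hcont : ((PySem.Dict.ofList torneos).items.foldl
        (fun x y => List.foldl (pvStepB (PySem.Set.ofList naciones) naciones.length) x y.2.zipIdx)
        PySem.Dict.empty).contains n = true := by
      rw [PySem.Dict.contains_eq_isSome_get?, hcounts]; rfl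
    have hgd : ((PySem.Dict.ofList torneos).items.foldl
        (fun x y => List.foldl (pvStepB (PySem.Set.ofList naciones) naciones.length) x y.2.zipIdx)
        PySem.Dict.empty).getD n [] =
        (PySem.Dict.ofList torneos).items.foldl (fun x y => pvBump n x y.2 0)
          (List.replicate naciones.length 0) := by
      rw [PySem.Dict.getD_eq_get?_getD, hcounts]; rfl
    rw [if_pos hcont, hgd]
  · rw [if_neg hmat]
    rw [if_neg hmat] at hcounts
    have hcont : ((PySem.Dict.ofList torneos).items.foldl
        (fun x y => List.foldl (pvStepB (PySem.Set.ofList naciones) naciones.length) x y.2.zipIdx)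
        PySem.Dict.empty).contains n = false := by
      rw [PySem.Dict.contains_eq_isSome_get?, hcounts]; rfl
    rw [if_neg (by simp [hcont])]
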